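-- pv_equiv track=rewrite | github.com/sdfrew2/pmakit | selection.py | split_trace_before_and_after
-- ===== SOURCE A (Python) =====
-- def split_trace_before_and_after(s, h, t):
--     isAfter = False
--     before = []
--     after = []
--     for y in t:
--         if (1 << y) & h != 0:
--             isAfter = True
--         else:
--             if isAfter:
--                 after.append(y)
--             else:
--                 before.append(y)
--     return (tuple(before), tuple(after))
-- ===== SOURCE B (Python) =====
-- def split_trace_before_and_after(s, h, t):
--     t_list = list(t)
--     idx = next((i for i, y in enumerate(t_list) if (1 << y) & h != 0), None)
--     if idx is None:
--         return (tuple(t_list), ())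
--     before = tuple(t_list[:idx])
--     after = tuple(y for y in t_list[idx + 1:] if (1 << y) & h == 0)
--     return (before, after)
-- ===== Notes on version B (the rewrite author's own statement) =====
-- stated objective: alternative
-- what changed: Replaces the stateful flag-accumulation loop with locate-the-first-marked-element, then split: before = prefix up to that index, after = filter of the suffix; no flag state is threaded through the scan.
import Mathlib
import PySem

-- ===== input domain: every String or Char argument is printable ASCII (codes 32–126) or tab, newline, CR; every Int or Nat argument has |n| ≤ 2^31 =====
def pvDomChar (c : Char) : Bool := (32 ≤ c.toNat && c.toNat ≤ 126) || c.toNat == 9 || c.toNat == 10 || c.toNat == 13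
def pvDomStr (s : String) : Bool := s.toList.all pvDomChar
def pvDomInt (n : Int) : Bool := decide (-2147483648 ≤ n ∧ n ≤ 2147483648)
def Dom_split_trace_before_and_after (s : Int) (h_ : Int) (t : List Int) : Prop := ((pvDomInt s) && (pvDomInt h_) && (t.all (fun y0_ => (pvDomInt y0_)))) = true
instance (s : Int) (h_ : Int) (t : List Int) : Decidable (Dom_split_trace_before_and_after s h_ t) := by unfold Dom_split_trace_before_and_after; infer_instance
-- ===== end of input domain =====

-- B replaces A's stateful flag-accumulation scan with locate-first-marked-index, then split-and-filter (alternative decomposition, same cost).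


-- (1 << y) & h != 0 — exact for y ≥ 0 (Pre_ excludes negative y, where Python raises ValueError)
def pvMarked (h_ : Int) (y : Int) : Bool := Int.land ((1 : Int) <<< y.toNat) h_ != 0

-- ===== PORT A =====
-- the for-loop of A over state (isAfter, before, after), branches in source order
def pvLoopA (h_ : Int) (isAfter : Bool) (before after : List Int) : List Int → List Int × List Int
  | [] => (before, after)
  | y :: ys =>
    if pvMarked h_ y then pvLoopA h_ true before after ys
    else if isAfter then pvLoopA h_ isAfter before (after ++ [y]) ys
    else pvLoopA h_ isAfter (before ++ [y]) after ys

def split_trace_before_and_after (s : Int) (h_ : Int) (t : List Int) : List Int × List Int :=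
  pvLoopA h_ false [] [] t

-- ===== PORT B =====
-- next((i for i, y in enumerate(t_list) if (1 << y) & h != 0), None)
def pvFindMarked (h_ : Int) (i : Nat) : List Int → Option Nat
  | [] => none
  | y :: ys => if pvMarked h_ y then some i else pvFindMarked h_ (i + 1) ys

def split_trace_before_and_after_alt (s : Int) (h_ : Int) (t : List Int) : List Int × List Int :=
  match pvFindMarked h_ 0 t with
  | none => (t, [])
  | some idx => (t.take idx, (t.drop (idx + 1)).filter (fun y => !pvMarked h_ y))

-- ===== PRECONDITION & SPEC =====
-- Pre_ excludes traces with a negative element, where Python's '1 << y' raises ValueError in both A and B.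
def Pre_split_trace_before_and_after (s : Int) (h_ : Int) (t : List Int) : Prop := ∀ y ∈ t, 0 ≤ y
instance (s : Int) (h_ : Int) (t : List Int) : Decidable (Pre_split_trace_before_and_after s h_ t) := by unfold Pre_split_trace_before_and_after; infer_instance
def pvWitness_split_trace_before_and_after : Int × Int × List Int := (0, 10, [0, 1, 3, 2, 1])
def Spec_split_trace_before_and_after (s : Int) (h_ : Int) (t : List Int) (out : List Int × List Int) : Prop := out = split_trace_before_and_after_alt s h_ t
instance (s : Int) (h_ : Int) (t : List Int) (out : List Int × List Int) : Decidable (Spec_split_trace_before_and_after s h_ t out) := by unfold Spec_split_trace_before_and_after; infer_instance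

-- ===== CLAIM (what is proved, stated in full; the proofs are below) =====
def Claim_equal_split_trace_before_and_after : Prop := ∀ (s : Int) (h_ : Int) (t : List Int), Dom_split_trace_before_and_after s h_ t → Pre_split_trace_before_and_after s h_ t → Spec_split_trace_before_and_after s h_ t (split_trace_before_and_after s h_ t)

-- ===== LEMMAS AND PROOFS =====

-- once the flag is set, the loop only filters unmarked elements into `after`
theorem pvLoopA_true (h_ : Int) (before after : List Int) (t : List Int) :
    pvLoopA h_ true before after t = (before, after ++ t.filter (fun y => !pvMarked h_ y)) := by
  induction t generalizing after with
  | nil => simp [pvLoopA]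
  | cons y ys ih =>
    by_cases hm : pvMarked h_ y <;> simp [pvLoopA, hm, List.filter_cons, ih]

-- findMarked shifts with the running index
theorem pvFindMarked_shift (h_ : Int) (i : Nat) (t : List Int) :
    pvFindMarked h_ i t = (pvFindMarked h_ 0 t).map (· + i) := by
  induction t generalizing i with
  | nil => simp [pvFindMarked]
  | cons y ys ih =>
    by_cases hm : pvMarked h_ y
    · simp [pvFindMarked, hm]
    · simp only [pvFindMarked, hm, if_false]
      rw [ih (i + 1), ih 1]
      cases pvFindMarked h_ 0 ys <;> simp <;> omega

-- the flag-off loop equals B's locate-then-split decomposition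
theorem pvLoopA_false (h_ : Int) (before : List Int) (t : List Int) :
    pvLoopA h_ false before [] t =
      match pvFindMarked h_ 0 t with
      | none => (before ++ t, [])
      | some idx => (before ++ t.take idx, (t.drop (idx + 1)).filter (fun y => !pvMarked h_ y)) := by
  induction t generalizing before with
  | nil => simp [pvLoopA, pvFindMarked]
  | cons y ys ih =>
    by_cases hm : pvMarked h_ y
    · simp [pvLoopA, hm, pvFindMarked, pvLoopA_true]
    · simp only [pvLoopA, hm, if_false, Bool.false_eq_true, pvFindMarked]
      rw [ih (before ++ [y]), pvFindMarked_shift h_ 1 ys]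
      cases pvFindMarked h_ 0 ys <;> simp

-- ===== VERDICT (by name: the statement is the Claim_ definition above) =====
theorem split_trace_before_and_after_spec : Claim_equal_split_trace_before_and_after := by
  intro s h_ t _ _
  unfold Spec_split_trace_before_and_after split_trace_before_and_after split_trace_before_and_after_alt
  rw [pvLoopA_false]
  cases pvFindMarked h_ 0 t <;> simp
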